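-- pv_equiv track=rewrite | github.com/PrasadKesavarapu/skillbot | app/main.py | infer_roles_from_skill_names
-- ===== SOURCE A (Python) =====
-- from typing import List, Optional, Dict
--
-- def infer_roles_from_skill_names(skill_names: List[str]) -> List[str]:
--     """Very simple heuristics to infer possible roles from skill names."""
--     names = set(skill_names)
--     roles: List[str] = []
--
--     if "React" in names and (("FastAPI" in names) or ("Node.js" in names) or ("Express" in names)):
--         roles.append("Full-Stack Developer")
--
--     if any(s in names for s in ["FastAPI", "Django", "Node.js", "Express", "REST API"]):
--         roles.append("Backend Engineer")
--
--     if any(s in names for s in ["AWS", "Azure", "GCP", "Docker", "Kubernetes", "CI/CD", "GitHub Actions"]):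
--         roles.append("DevOps / Cloud Engineer")
--
--     if any(s in names for s in ["Pandas", "NumPy", "SQL", "PostgreSQL", "MongoDB"]):
--         roles.append("Data Engineer / Data Analyst")
--
--     if any(s in names for s in ["LangChain", "ChromaDB"]):
--         roles.append("LLM / RAG Engineer")
--
--     # Deduplicate while preserving order
--     seen = set()
--     unique_roles: List[str] = []
--     for r in roles:
--         if r not in seen:
--             unique_roles.append(r)
--             seen.add(r)
--     return unique_roles
-- ===== SOURCE B (Python) =====
-- # One pass over the input skills: each skill is looked up in an inverted
-- # skill->role-index map and sets a flag; labels are then emitted in fixed order.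
--
-- _LABELS = [
--     "Full-Stack Developer",
--     "Backend Engineer",
--     "DevOps / Cloud Engineer",
--     "Data Engineer / Data Analyst",
--     "LLM / RAG Engineer",
-- ]
--
-- _SKILL_TO_ROLE = {
--     "FastAPI": 1, "Django": 1, "Node.js": 1, "Express": 1, "REST API": 1,
--     "AWS": 2, "Azure": 2, "GCP": 2, "Docker": 2, "Kubernetes": 2,
--     "CI/CD": 2, "GitHub Actions": 2,
--     "Pandas": 3, "NumPy": 3, "SQL": 3, "PostgreSQL": 3, "MongoDB": 3,
--     "LangChain": 4, "ChromaDB": 4,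
-- }
--
-- _FS_PARTNERS = ("FastAPI", "Node.js", "Express")
--
--
-- def infer_roles_from_skill_names(skill_names):
--     """Single pass with an inverted index: scan the skills once, flagging
--     each triggered role, then emit the labels in fixed order."""
--     hit = [False] * 5
--     react = False
--     partner = False
--     for s in skill_names:
--         if s == "React":
--             react = True
--         if s in _FS_PARTNERS:
--             partner = True
--         r = _SKILL_TO_ROLE.get(s)
--         if r is not None:
--             hit[r] = True
--     hit[0] = react and partner
--     return [_LABELS[i] for i in range(5) if hit[i]]
-- ===== Notes on version B (the rewrite author's own statement) =====
-- stated objective: alternative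
-- what changed: Inverts the traversal: instead of testing each fixed rule group against a set of the input, B scans the input skills once, each skill setting a role flag via an inverted skill-to-role-index map (React/backend-partner flags combined for the compound Full-Stack rule), then emits the labels in fixed order; the dedup pass disappears.
import Mathlib
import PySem

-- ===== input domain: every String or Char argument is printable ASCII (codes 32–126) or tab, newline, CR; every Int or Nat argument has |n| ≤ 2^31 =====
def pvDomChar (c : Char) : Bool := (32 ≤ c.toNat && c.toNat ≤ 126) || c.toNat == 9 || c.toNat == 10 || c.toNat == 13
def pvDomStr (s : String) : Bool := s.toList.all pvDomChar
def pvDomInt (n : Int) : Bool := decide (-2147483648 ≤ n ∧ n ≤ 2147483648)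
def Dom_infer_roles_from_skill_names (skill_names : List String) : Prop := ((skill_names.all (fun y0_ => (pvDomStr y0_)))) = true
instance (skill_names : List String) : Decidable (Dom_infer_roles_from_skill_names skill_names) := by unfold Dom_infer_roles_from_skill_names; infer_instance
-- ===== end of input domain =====

-- B inverts the traversal: one pass over the input skills with an inverted skill->role map setting flags, instead of A's per-rule membership tests against a set; same cost (alternative decomposition).

-- ===== PORT A =====
def infer_roles_from_skill_names (skill_names : List String) : List String :=
  let names : PySem.Set String := PySem.Set.ofList skill_names
  let roles : List String := []
  let roles := if PySem.Set.contains names "React" &&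
      ((PySem.Set.contains names "FastAPI" || PySem.Set.contains names "Node.js") ||
        PySem.Set.contains names "Express")
    then roles ++ ["Full-Stack Developer"] else roles
  let roles := if (["FastAPI", "Django", "Node.js", "Express", "REST API"].any
      (fun s => PySem.Set.contains names s))
    then roles ++ ["Backend Engineer"] else roles
  let roles := if (["AWS", "Azure", "GCP", "Docker", "Kubernetes", "CI/CD", "GitHub Actions"].any
      (fun s => PySem.Set.contains names s))
    then roles ++ ["DevOps / Cloud Engineer"] else roles
  let roles := if (["Pandas", "NumPy", "SQL", "PostgreSQL", "MongoDB"].any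
      (fun s => PySem.Set.contains names s))
    then roles ++ ["Data Engineer / Data Analyst"] else roles
  let roles := if (["LangChain", "ChromaDB"].any (fun s => PySem.Set.contains names s))
    then roles ++ ["LLM / RAG Engineer"] else roles
  -- Deduplicate while preserving order
  (roles.foldl
    (fun (p : PySem.Set String × List String) r =>
      if PySem.Set.contains p.1 r then p else (PySem.Set.add p.1 r, p.2 ++ [r]))
    (PySem.Set.empty, [])).2

-- ===== PORT B =====
def pvLabels : List String :=
  [ "Full-Stack Developer", "Backend Engineer", "DevOps / Cloud Engineer",
    "Data Engineer / Data Analyst", "LLM / RAG Engineer" ]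

def pvSkillToRole : PySem.Dict String Int := PySem.Dict.ofList
  [ ("FastAPI", 1), ("Django", 1), ("Node.js", 1), ("Express", 1), ("REST API", 1),
    ("AWS", 2), ("Azure", 2), ("GCP", 2), ("Docker", 2), ("Kubernetes", 2),
    ("CI/CD", 2), ("GitHub Actions", 2),
    ("Pandas", 3), ("NumPy", 3), ("SQL", 3), ("PostgreSQL", 3), ("MongoDB", 3),
    ("LangChain", 4), ("ChromaDB", 4) ]

def pvFsPartners : List String := ["FastAPI", "Node.js", "Express"]

-- fold state: (hit flags list of length 5, react flag, partner flag); the loop body of B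
def pvStep (st : List Bool × Bool × Bool) (s : String) : List Bool × Bool × Bool :=
  let react := if s == "React" then true else st.2.1
  let partner := if pvFsPartners.contains s then true else st.2.2
  let hit := match PySem.Dict.get? pvSkillToRole s with
    | some r => PySem.List.pySetD st.1 r true
    | none => st.1
  (hit, react, partner)

def infer_roles_from_skill_names_alt (skill_names : List String) : List String :=
  let st := skill_names.foldl pvStep ([false, false, false, false, false], false, false)
  let hit := PySem.List.pySetD st.1 0 (st.2.1 && st.2.2)
  (PySem.List.pyRange 0 5 1).foldl
    (fun acc i =>
      if PySem.List.pyGetD hit i false then acc ++ [PySem.List.pyGetD pvLabels i ""] else acc)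
    []

-- ===== PRECONDITION & SPEC =====
def Spec_infer_roles_from_skill_names (skill_names : List String) (out : List String) : Prop := out = infer_roles_from_skill_names_alt skill_names
instance (skill_names : List String) (out : List String) : Decidable (Spec_infer_roles_from_skill_names skill_names out) := by unfold Spec_infer_roles_from_skill_names; infer_instance

-- ===== CLAIM (what is proved, stated in full; the proofs are below) =====
def Claim_equal_infer_roles_from_skill_names : Prop := ∀ (skill_names : List String), Dom_infer_roles_from_skill_names skill_names → Spec_infer_roles_from_skill_names skill_names (infer_roles_from_skill_names skill_names)

-- ===== LEMMAS AND PROOFS =====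

theorem pvSkillToRole_eq : pvSkillToRole = PySem.Dict.mk
  [ ("FastAPI", 1), ("Django", 1), ("Node.js", 1), ("Express", 1), ("REST API", 1),
    ("AWS", 2), ("Azure", 2), ("GCP", 2), ("Docker", 2), ("Kubernetes", 2),
    ("CI/CD", 2), ("GitHub Actions", 2),
    ("Pandas", 3), ("NumPy", 3), ("SQL", 3), ("PostgreSQL", 3), ("MongoDB", 3),
    ("LangChain", 4), ("ChromaDB", 4) ] := by rfl

-- per-element effect of B's fold step on a state with hit[0] = false
theorem pv_step_eval (x : String) (h1 h2 h3 h4 r p : Bool) :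
    pvStep ([false, h1, h2, h3, h4], r, p) x
    = ([false,
        h1 || (x == "FastAPI" || x == "Django" || x == "Node.js" || x == "Express" || x == "REST API"),
        h2 || (x == "AWS" || x == "Azure" || x == "GCP" || x == "Docker" || x == "Kubernetes" || x == "CI/CD" || x == "GitHub Actions"),
        h3 || (x == "Pandas" || x == "NumPy" || x == "SQL" || x == "PostgreSQL" || x == "MongoDB"),
        h4 || (x == "LangChain" || x == "ChromaDB")],
       r || ("React" == x),
       p || (x == "FastAPI" || x == "Node.js" || x == "Express")) := by
  by_cases hx0 : x = "FastAPI"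
  · subst hx0; simp [pvStep, pvFsPartners, pvSkillToRole_eq, PySem.Dict.get?, PySem.List.pySetD, PySem.List.pySet?, PySem.List.pyIdx?, List.set]
  by_cases hx1 : x = "Django"
  · subst hx1; simp [pvStep, pvFsPartners, pvSkillToRole_eq, PySem.Dict.get?, PySem.List.pySetD, PySem.List.pySet?, PySem.List.pyIdx?, List.set]
  by_cases hx2 : x = "Node.js"
  · subst hx2; simp [pvStep, pvFsPartners, pvSkillToRole_eq, PySem.Dict.get?, PySem.List.pySetD, PySem.List.pySet?, PySem.List.pyIdx?, List.set]
  by_cases hx3 : x = "Express"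
  · subst hx3; simp [pvStep, pvFsPartners, pvSkillToRole_eq, PySem.Dict.get?, PySem.List.pySetD, PySem.List.pySet?, PySem.List.pyIdx?, List.set]
  by_cases hx4 : x = "REST API"
  · subst hx4; simp [pvStep, pvFsPartners, pvSkillToRole_eq, PySem.Dict.get?, PySem.List.pySetD, PySem.List.pySet?, PySem.List.pyIdx?, List.set]
  by_cases hx5 : x = "AWS"
  · subst hx5; simp [pvStep, pvFsPartners, pvSkillToRole_eq, PySem.Dict.get?, PySem.List.pySetD, PySem.List.pySet?, PySem.List.pyIdx?, List.set]
  by_cases hx6 : x = "Azure"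
  · subst hx6; simp [pvStep, pvFsPartners, pvSkillToRole_eq, PySem.Dict.get?, PySem.List.pySetD, PySem.List.pySet?, PySem.List.pyIdx?, List.set]
  by_cases hx7 : x = "GCP"
  · subst hx7; simp [pvStep, pvFsPartners, pvSkillToRole_eq, PySem.Dict.get?, PySem.List.pySetD, PySem.List.pySet?, PySem.List.pyIdx?, List.set]
  by_cases hx8 : x = "Docker"
  · subst hx8; simp [pvStep, pvFsPartners, pvSkillToRole_eq, PySem.Dict.get?, PySem.List.pySetD, PySem.List.pySet?, PySem.List.pyIdx?, List.set]
  by_cases hx9 : x = "Kubernetes"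
  · subst hx9; simp [pvStep, pvFsPartners, pvSkillToRole_eq, PySem.Dict.get?, PySem.List.pySetD, PySem.List.pySet?, PySem.List.pyIdx?, List.set]
  by_cases hx10 : x = "CI/CD"
  · subst hx10; simp [pvStep, pvFsPartners, pvSkillToRole_eq, PySem.Dict.get?, PySem.List.pySetD, PySem.List.pySet?, PySem.List.pyIdx?, List.set]
  by_cases hx11 : x = "GitHub Actions"
  · subst hx11; simp [pvStep, pvFsPartners, pvSkillToRole_eq, PySem.Dict.get?, PySem.List.pySetD, PySem.List.pySet?, PySem.List.pyIdx?, List.set]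
  by_cases hx12 : x = "Pandas"
  · subst hx12; simp [pvStep, pvFsPartners, pvSkillToRole_eq, PySem.Dict.get?, PySem.List.pySetD, PySem.List.pySet?, PySem.List.pyIdx?, List.set]
  by_cases hx13 : x = "NumPy"
  · subst hx13; simp [pvStep, pvFsPartners, pvSkillToRole_eq, PySem.Dict.get?, PySem.List.pySetD, PySem.List.pySet?, PySem.List.pyIdx?, List.set]
  by_cases hx14 : x = "SQL"
  · subst hx14; simp [pvStep, pvFsPartners, pvSkillToRole_eq, PySem.Dict.get?, PySem.List.pySetD, PySem.List.pySet?, PySem.List.pyIdx?, List.set]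
  by_cases hx15 : x = "PostgreSQL"
  · subst hx15; simp [pvStep, pvFsPartners, pvSkillToRole_eq, PySem.Dict.get?, PySem.List.pySetD, PySem.List.pySet?, PySem.List.pyIdx?, List.set]
  by_cases hx16 : x = "MongoDB"
  · subst hx16; simp [pvStep, pvFsPartners, pvSkillToRole_eq, PySem.Dict.get?, PySem.List.pySetD, PySem.List.pySet?, PySem.List.pyIdx?, List.set]
  by_cases hx17 : x = "LangChain"
  · subst hx17; simp [pvStep, pvFsPartners, pvSkillToRole_eq, PySem.Dict.get?, PySem.List.pySetD, PySem.List.pySet?, PySem.List.pyIdx?, List.set]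
  by_cases hx18 : x = "ChromaDB"
  · subst hx18; simp [pvStep, pvFsPartners, pvSkillToRole_eq, PySem.Dict.get?, PySem.List.pySetD, PySem.List.pySet?, PySem.List.pyIdx?, List.set]
  by_cases hx19 : x = "React"
  · subst hx19; simp [pvStep, pvFsPartners, pvSkillToRole_eq, PySem.Dict.get?, PySem.List.pySetD, PySem.List.pySet?, PySem.List.pyIdx?, List.set]
  · simp [pvStep, pvFsPartners, pvSkillToRole_eq, PySem.Dict.get?, List.find?,
      beq_eq_false_iff_ne.mpr (Ne.symm hx0), beq_eq_false_iff_ne.mpr hx0, beq_eq_false_iff_ne.mpr (Ne.symm hx1), beq_eq_false_iff_ne.mpr hx1, beq_eq_false_iff_ne.mpr (Ne.symm hx2), beq_eq_false_iff_ne.mpr hx2, beq_eq_false_iff_ne.mpr (Ne.symm hx3), beq_eq_false_iff_ne.mpr hx3, beq_eq_false_iff_ne.mpr (Ne.symm hx4), beq_eq_false_iff_ne.mpr hx4, beq_eq_false_iff_ne.mpr (Ne.symm hx5), beq_eq_false_iff_ne.mpr hx5, beq_eq_false_iff_ne.mpr (Ne.symm hx6), beq_eq_false_iff_ne.mpr hx6,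 beq_eq_false_iff_ne.mpr (Ne.symm hx7), beq_eq_false_iff_ne.mpr hx7, beq_eq_false_iff_ne.mpr (Ne.symm hx8), beq_eq_false_iff_ne.mpr hx8, beq_eq_false_iff_ne.mpr (Ne.symm hx9), beq_eq_false_iff_ne.mpr hx9, beq_eq_false_iff_ne.mpr (Ne.symm hx10), beq_eq_false_iff_ne.mpr hx10, beq_eq_false_iff_ne.mpr (Ne.symm hx11), beq_eq_false_iff_ne.mpr hx11, beq_eq_false_iff_ne.mpr (Ne.symm hx12), beq_eq_false_iff_ne.mpr hx12, beq_eq_false_iff_ne.mpr (Ne.symm hx13), beq_eq_false_iff_ne.mpr hx13, beq_eq_false_iff_ne.mpr (Ne.symm hx14), beq_eq_false_iff_ne.mpr hx14, beq_eq_false_iff_ne.mpr (Ne.symm hx15), beq_eq_false_iff_ne.mpr hx15, beq_eq_false_iff_ne.mpr (Ne.symm hx16), beq_eq_false_iff_ne.mpr hx16, beq_eq_false_iff_ne.mpr (Ne.symm hx17), beq_eq_false_iff_ne.mpr hx17, beq_eq_false_iff_ne.mpr (Ne.symm hx18), beq_eq_false_iff_ne.mpr hx18, beq_eq_false_iff_ne.mpr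 (Ne.symm hx19), beq_eq_false_iff_ne.mpr hx19]
    tauto

-- the fold of B computes: flags are ORs of membership tests over the scanned prefix
theorem pv_fold_spec (l : List String) (h1 h2 h3 h4 r p : Bool) :
    l.foldl pvStep ([false, h1, h2, h3, h4], r, p)
    = ([false,
        h1 || l.any (fun s => s == "FastAPI" || s == "Django" || s == "Node.js" || s == "Express" || s == "REST API"),
        h2 || l.any (fun s => s == "AWS" || s == "Azure" || s == "GCP" || s == "Docker" || s == "Kubernetes" || s == "CI/CD" || s == "GitHub Actions"),
        h3 || l.any (fun s => s == "Pandas" || s == "NumPy" || s == "SQL" || s == "PostgreSQL" || s == "MongoDB"),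
        h4 || l.any (fun s => s == "LangChain" || s == "ChromaDB")],
       r || l.contains "React",
       p || l.any (fun s => s == "FastAPI" || s == "Node.js" || s == "Express")) := by
  induction l generalizing h1 h2 h3 h4 r p with
  | nil => simp
  | cons x xs ih =>
    rw [List.foldl_cons, pv_step_eval, ih]
    simp [List.any_cons, Bool.or_assoc, beq_eq_decide]

theorem pv_any_or (l : List String) (f g : String → Bool) :
    l.any (fun s => f s || g s) = (l.any f || l.any g) := by
  induction l with
  | nil => rfl
  | cons x xs ih => simp only [List.any_cons, ih]; cases f x <;> cases g x <;>
      cases (xs.any f) <;> cases (xs.any g) <;> rfl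

-- ===== VERDICT (by name: the statement is the Claim_ definition above) =====
theorem infer_roles_from_skill_names_spec : Claim_equal_infer_roles_from_skill_names := by
  intro skill_names _
  unfold Spec_infer_roles_from_skill_names infer_roles_from_skill_names infer_roles_from_skill_names_alt
  rw [pv_fold_spec]
  have hc : ∀ a : String, PySem.Set.contains (PySem.Set.ofList skill_names) a = skill_names.contains a := by
    intro a
    simp [PySem.Set.contains_eq_listContains, PySem.Set.mem_ofList]
  simp only [hc, pv_any_or, List.any_beq', Bool.false_or]
  simp only [List.any_cons, List.any_nil, Bool.or_false, Bool.or_assoc]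
  generalize (skill_names.contains "React" && (skill_names.contains "FastAPI" || (skill_names.contains "Node.js" || (skill_names.contains "Express")))) = b1
  generalize (skill_names.contains "FastAPI" || (skill_names.contains "Django" || (skill_names.contains "Node.js" || (skill_names.contains "Express" || (skill_names.contains "REST API"))))) = b2
  generalize (skill_names.contains "AWS" || (skill_names.contains "Azure" || (skill_names.contains "GCP" || (skill_names.contains "Docker" || (skill_names.contains "Kubernetes" || (skill_names.contains "CI/CD" || (skill_names.contains "GitHub Actions"))))))) = b3
  generalize (skill_names.contains "Pandas" || (skill_names.contains "NumPy" || (skill_names.contains "SQL" || (skill_names.contains "PostgreSQL" || (skill_names.contains "MongoDB"))))) = b4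
  generalize (skill_names.contains "LangChain" || (skill_names.contains "ChromaDB")) = b5
  cases b1 <;> cases b2 <;> cases b3 <;> cases b4 <;> cases b5 <;> rfl
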